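-- pv_equiv track=rewrite | github.com/ArjanDeLeuw/assessment_PLC_SE | InvoiceDatabase.py | line_parser
-- ===== SOURCE A (Python) =====
-- def line_parser(in_lines):
--     """
--     This function divides the string in a list of list where each list is one invoice.
--
--     Keyword arguments:
--         in_lines: a list containing all the lines from the file
--     Return:
--         parsed_lines: list of list where each list contains lines from one invoice
--     """
--     parsed_lines = []
--
--     for i in range(len(in_lines)):
--         if in_lines[i].startswith('Invoice ID'):
--             start_invoice = i-8
--             for it in range(i, len(in_lines)):
--                 if in_lines[it].startswith('total\t'):
--                     end_invoice = it + 1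
--                     break
--             parsed_lines.append(in_lines[start_invoice:end_invoice])
--     return parsed_lines
-- ===== SOURCE B (Python) =====
-- def line_parser(in_lines):
--     n = len(in_lines)
--     # backward pass: next_total[i] = index of first line at >= i starting with 'total\t', or None
--     next_total = [None] * n
--     nt = None
--     for i in range(n - 1, -1, -1):
--         if in_lines[i].startswith('total\t'):
--             nt = i
--         next_total[i] = nt
--     parsed_lines = []
--     for i, line in enumerate(in_lines):
--         if line.startswith('Invoice ID') and next_total[i] is not None:
--             parsed_lines.append(in_lines[i - 8:next_total[i] + 1])
--     return parsed_lines
-- ===== Notes on version B (the rewrite author's own statement) =====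
-- stated objective: alternative
-- what changed: Instead of re-scanning forward from every header for its 'total\t' line (nested loops), B precomputes in one backward pass the index of the next 'total\t' line for every position, then emits each invoice slice with an O(1) lookup.
-- intended difference: On inputs where some 'Invoice ID' header has no following 'total\t' line (but the first header has one, so A returns): A appends a slice cut at the stale end index left over from the previous invoice, B skips the malformed header, which is the intended per-invoice split. — e.g. on line_parser(["Invoice ID 1", "total\tx", "Invoice ID 2"]): A returns [["Invoice ID 1", "total\tx"], ["Invoice ID 1", "total\tx"]], B returns [["Invoice ID 1", "total\tx"]]
import Mathlib
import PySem

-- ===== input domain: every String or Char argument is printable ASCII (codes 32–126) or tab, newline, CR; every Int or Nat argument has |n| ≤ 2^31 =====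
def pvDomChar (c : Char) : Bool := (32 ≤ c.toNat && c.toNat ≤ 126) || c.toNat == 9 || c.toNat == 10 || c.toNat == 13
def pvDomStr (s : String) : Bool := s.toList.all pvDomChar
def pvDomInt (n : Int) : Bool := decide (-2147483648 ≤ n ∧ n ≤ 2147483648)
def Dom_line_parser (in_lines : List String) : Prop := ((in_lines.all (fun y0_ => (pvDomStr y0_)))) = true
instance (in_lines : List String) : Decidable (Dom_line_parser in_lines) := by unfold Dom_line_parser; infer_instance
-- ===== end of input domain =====

-- B replaces A's forward re-scan for 'total\t' from every header by one backward pass that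
-- precomputes each position's next 'total\t' index; B skips a header with no following total
-- (A there reuses the previous invoice's stale end index — see D_ below).  Objective: alternative.

-- ===== PORT A =====
-- A's inner loop 'for it in range(i, len(in_lines)): if … startswith('total\t'): break',
-- scanning the remaining suffix with `it` as the absolute index; returns the break index
def lpFindTotal : List String → Nat → Option Nat
  | [], _ => none
  | l :: rest, it =>
      if PySem.Str.startswith l "total\t" then some it else lpFindTotal rest (it + 1)

-- A's outer loop over i in range(len(in_lines)); endInv is Python's end_invoice
-- (none = not yet assigned; Python raises UnboundLocalError if it is used then)
def lpLoopA (in_lines : List String) :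
    List String → Nat → Option Nat → List (List String) → List (List String)
  | [], _, _, acc => acc
  | l :: rest, i, endInv, acc =>
      if PySem.Str.startswith l "Invoice ID" then
        match lpFindTotal (l :: rest) i with
        | some t =>
            lpLoopA in_lines rest (i + 1) (some (t + 1))
              (acc ++ [PySem.List.slice in_lines (some ((i : Int) - 8)) (some ((t : Int) + 1))])
        | none =>
            match endInv with
            | some e =>
                lpLoopA in_lines rest (i + 1) (some e)
                  (acc ++ [PySem.List.slice in_lines (some ((i : Int) - 8)) (some (e : Int))])
            | none => lpLoopA in_lines rest (i + 1) none acc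
                -- Python raises UnboundLocalError here; excluded by Pre_
      else lpLoopA in_lines rest (i + 1) endInv acc

def line_parser (in_lines : List String) : List (List String) :=
  lpLoopA in_lines in_lines 0 none []

-- ===== PORT B =====
-- backward pass of Source B: entry for absolute index i is the index of the first
-- 'total\t' line at or after it, or none
def lpNextTotals : List String → Nat → List (Option Nat)
  | [], _ => []
  | l :: rest, i =>
      let tail := lpNextTotals rest (i + 1)
      (if PySem.Str.startswith l "total\t" then some i else tail.headD none) :: tail

-- forward pass of Source B: for i, line in enumerate(in_lines)
def lpLoopB (in_lines : List String) (nt : List (Option Nat)) :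
    List String → Nat → List (List String) → List (List String)
  | [], _, acc => acc
  | l :: rest, i, acc =>
      lpLoopB in_lines nt rest (i + 1)
        (if PySem.Str.startswith l "Invoice ID" then
          match nt.getD i none with
          | some t => acc ++ [PySem.List.slice in_lines (some ((i : Int) - 8)) (some ((t : Int) + 1))]
          | none => acc
        else acc)

def line_parser_alt (in_lines : List String) : List (List String) :=
  lpLoopB in_lines (lpNextTotals in_lines 0) in_lines 0 []

-- ===== PRECONDITION & SPEC =====
-- Pre_ excludes exactly the inputs on which A raises UnboundLocalError: those whose first
-- 'Invoice ID' header has no following 'total\t' line.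
def Pre_line_parser (in_lines : List String) : Prop :=
  ∀ i < in_lines.length,
    (PySem.Str.startswith (in_lines.getD i "") "Invoice ID" = true ∧
     ∀ j < i, PySem.Str.startswith (in_lines.getD j "") "Invoice ID" = false) →
    ∃ t < in_lines.length, i ≤ t ∧ PySem.Str.startswith (in_lines.getD t "") "total\t" = true
instance (in_lines : List String) : Decidable (Pre_line_parser in_lines) := by
  unfold Pre_line_parser; infer_instance

def pvWitness_line_parser : List String := ["Invoice ID 1", "item\t2", "total\t3"]

-- On inputs where some 'Invoice ID' header has no following 'total\t' line (while the first header
-- has one, so A returns), A appends a slice cut at the stale end index left from the previous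
-- invoice; B skips the malformed header, which is the intended per-invoice split.
def D_line_parser (in_lines : List String) : Prop :=
  ∃ i < in_lines.length,
    PySem.Str.startswith (in_lines.getD i "") "Invoice ID" = true ∧
    ∀ t < in_lines.length, i ≤ t → PySem.Str.startswith (in_lines.getD t "") "total\t" = false
instance (in_lines : List String) : Decidable (D_line_parser in_lines) := by
  unfold D_line_parser; infer_instance

def Spec_line_parser (in_lines : List String) (out : List (List String)) : Prop :=
  ¬ D_line_parser in_lines → out = line_parser_alt in_lines
instance (in_lines : List String) (out : List (List String)) : Decidable (Spec_line_parser in_lines out) := by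
  unfold Spec_line_parser; infer_instance

def pvDiffWitness_line_parser : List String := ["Invoice ID 1", "total\tx", "Invoice ID 2"]
def pvDiffWitnessOut_line_parser : (List (List String)) × (List (List String)) :=
  ([["Invoice ID 1", "total\tx"], ["Invoice ID 1", "total\tx"]],
   [["Invoice ID 1", "total\tx"]])

-- ===== CLAIM (what is proved, stated in full; the proofs are below) =====
def Claim_unchanged_line_parser : Prop := ∀ (in_lines : List String), Dom_line_parser in_lines → Pre_line_parser in_lines → Spec_line_parser in_lines (line_parser in_lines)
def Claim_changed_line_parser : Prop := Dom_line_parser (pvDiffWitness_line_parser) ∧ Pre_line_parser (pvDiffWitness_line_parser) ∧ D_line_parser (pvDiffWitness_line_parser) ∧ line_parser (pvDiffWitness_line_parser) = pvDiffWitnessOut_line_parser.1 ∧ line_parser_alt (pvDiffWitness_line_parser) = pvDiffWitnessOut_line_parser.2 ∧ pvDiffWitnessOut_line_parser.1 ≠ pvDiffWitnessOut_line_parser.2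
def Claim_exact_line_parser : Prop := ∀ (in_lines : List String), Dom_line_parser in_lines → Pre_line_parser in_lines → D_line_parser in_lines → line_parser in_lines ≠ line_parser_alt in_lines


-- ===== LEMMAS AND PROOFS =====

theorem lp_nt_lookup (ls : List String) : ∀ (k j : Nat),
    (lpNextTotals ls k).getD j none = lpFindTotal (ls.drop j) (k + j) := by
  induction ls with
  | nil => intro k j; simp [lpNextTotals, lpFindTotal]
  | cons l rest ih =>
    intro k j
    cases j with
    | zero =>
      simp only [lpNextTotals, List.getD_cons_zero, List.drop_zero, lpFindTotal, Nat.add_zero]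
      split
      · rfl
      · have h0 := ih (k + 1) 0
        cases hnt : lpNextTotals rest (k + 1) with
        | nil => simpa [hnt] using h0
        | cons a as => simpa [hnt] using h0
    | succ j =>
      simp only [lpNextTotals, List.getD_cons_succ, List.drop_succ_cons]
      rw [ih (k + 1) j]
      ring_nf

theorem lp_ft_isSome (xs : List String) : ∀ (k : Nat),
    (lpFindTotal xs k).isSome = xs.any (fun s => PySem.Str.startswith s "total\t") := by
  induction xs with
  | nil => intro k; simp [lpFindTotal]
  | cons l rest ih =>
    intro k
    simp only [lpFindTotal, List.any_cons]
    split <;> simp_all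

theorem lp_loops_eq_aux (ls : List String) : ∀ (d i : Nat) (e : Option Nat) (acc : List (List String)),
    ls.length - i ≤ d →
    (∀ j, i ≤ j → j < ls.length →
      PySem.Str.startswith (ls.getD j "") "Invoice ID" = true →
      (lpFindTotal (ls.drop j) j).isSome) →
    lpLoopA ls (ls.drop i) i e acc = lpLoopB ls (lpNextTotals ls 0) (ls.drop i) i acc := by
  intro d
  induction d with
  | zero =>
    intro i e acc hd H
    rw [List.drop_eq_nil_of_le (by omega)]
    simp [lpLoopA, lpLoopB]
  | succ d ih =>
    intro i e acc hd H
    by_cases hi : i < ls.length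
    · rw [List.drop_eq_getElem_cons hi]
      simp only [lpLoopA, lpLoopB]
      rw [← List.drop_eq_getElem_cons hi]
      by_cases hh : PySem.Str.startswith ls[i] "Invoice ID" = true
      · have hsome : (lpFindTotal (ls.drop i) i).isSome := by
          apply H i le_rfl hi
          rwa [List.getD_eq_getElem _ _ hi]
        obtain ⟨t, ht⟩ := Option.isSome_iff_exists.mp hsome
        have hnt : (lpNextTotals ls 0).getD i none = lpFindTotal (ls.drop i) i := by
          rw [lp_nt_lookup]; simp
        rw [hh, hnt, ht]
        exact ih (i + 1) (some (t + 1)) _ (by omega) (fun j hj => H j (by omega))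
      · simp only [hh]
        rw [if_neg (by simp [hh]), if_neg (by simp [hh])]
        exact ih (i + 1) e acc (by omega) (fun j hj => H j (by omega))
    · rw [List.drop_eq_nil_of_le (by omega)]
      simp [lpLoopA, lpLoopB]

theorem lp_H_of_not_D (ls : List String) (hnd : ¬ D_line_parser ls) :
    ∀ j, 0 ≤ j → j < ls.length →
      PySem.Str.startswith (ls.getD j "") "Invoice ID" = true →
      (lpFindTotal (ls.drop j) j).isSome := by
  intro j _ hj hh
  rw [lp_ft_isSome]
  unfold D_line_parser at hnd
  push Not at hnd
  obtain ⟨t, htlen, hjt, htot⟩ := hnd j hj hh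
  rw [List.any_eq_true]
  refine ⟨ls[t], ?_, ?_⟩
  · have : (ls.drop j)[t - j]'(by simp; omega) = ls[t] := by
      rw [List.getElem_drop]; congr 1; omega
    exact this ▸ List.getElem_mem _
  · rw [List.getD_eq_getElem _ _ htlen] at htot
    simpa using htot

theorem lp_ft_some (ls : List String) (j : Nat)
    (h : ∃ t, j ≤ t ∧ t < ls.length ∧ PySem.Str.startswith (ls.getD t "") "total\t" = true) :
    (lpFindTotal (ls.drop j) j).isSome := by
  obtain ⟨t, hjt, htlen, htot⟩ := h
  rw [lp_ft_isSome, List.any_eq_true]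
  refine ⟨ls[t], ?_, ?_⟩
  · have : (ls.drop j)[t - j]'(by simp; omega) = ls[t] := by
      rw [List.getElem_drop]; congr 1; omega
    exact this ▸ List.getElem_mem _
  · rw [List.getD_eq_getElem _ _ htlen] at htot
    simpa using htot

theorem lp_ft_none (ls : List String) (j : Nat)
    (h : ∀ t, j ≤ t → t < ls.length → PySem.Str.startswith (ls.getD t "") "total\t" = false) :
    lpFindTotal (ls.drop j) j = none := by
  rw [← Option.not_isSome_iff_eq_none, lp_ft_isSome]
  simp only [Bool.not_eq_true, List.any_eq_false]
  intro x hx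
  obtain ⟨k, hk, rfl⟩ := List.mem_iff_getElem.mp hx
  rw [List.getElem_drop]
  have hlen : j + k < ls.length := by simp at hk; omega
  have := h (j + k) (by omega) hlen
  rw [List.getD_eq_getElem _ _ hlen] at this
  exact this

def lpReady (ls : List String) (i : Nat) (e : Option Nat) : Prop :=
  e.isSome = true ∨
  ∀ j, i ≤ j → j < ls.length →
    PySem.Str.startswith (ls.getD j "") "Invoice ID" = true →
    (∀ k, i ≤ k → k < j → PySem.Str.startswith (ls.getD k "") "Invoice ID" = false) →
    (lpFindTotal (ls.drop j) j).isSome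

theorem lp_len_mono (ls : List String) : ∀ (d i : Nat) (e : Option Nat)
    (acc1 acc2 : List (List String)), ls.length - i ≤ d → lpReady ls i e →
    acc2.length ≤ acc1.length →
    (lpLoopB ls (lpNextTotals ls 0) (ls.drop i) i acc2).length ≤
      (lpLoopA ls (ls.drop i) i e acc1).length ∧
    (acc2.length < acc1.length →
      (lpLoopB ls (lpNextTotals ls 0) (ls.drop i) i acc2).length <
        (lpLoopA ls (ls.drop i) i e acc1).length) := by
  intro d
  induction d with
  | zero =>
    intro i e acc1 acc2 hd hr hle
    rw [List.drop_eq_nil_of_le (by omega)]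
    simp [lpLoopA, lpLoopB]
    omega
  | succ d ih =>
    intro i e acc1 acc2 hd hr hle
    by_cases hi : i < ls.length
    · rw [List.drop_eq_getElem_cons hi]
      simp only [lpLoopA, lpLoopB]
      rw [← List.drop_eq_getElem_cons hi]
      have hnt : (lpNextTotals ls 0).getD i none = lpFindTotal (ls.drop i) i := by
        rw [lp_nt_lookup]; simp
      by_cases hh : PySem.Str.startswith ls[i] "Invoice ID" = true
      · rw [hh, hnt]
        cases hft : lpFindTotal (ls.drop i) i with
        | some t =>
          have := ih (i + 1) (some (t + 1)) (acc1 ++ [PySem.List.slice ls (some ((i : Int) - 8)) (some ((t : Int) + 1))])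
            (acc2 ++ [PySem.List.slice ls (some ((i : Int) - 8)) (some ((t : Int) + 1))])
            (by omega) (Or.inl rfl) (by simp; omega)
          refine ⟨this.1, fun hlt => this.2 (by simp; omega)⟩
        | none =>
          have he : ∃ e0, e = some e0 := by
            cases hr with
            | inl h => exact Option.isSome_iff_exists.mp h
            | inr h =>
              exfalso
              have := h i le_rfl hi (by rwa [List.getD_eq_getElem _ _ hi]) (by omega)
              rw [hft] at this; simp at this
          obtain ⟨e0, rfl⟩ := he
          have := ih (i + 1) (some e0) (acc1 ++ [PySem.List.slice ls (some ((i : Int) - 8)) (some (e0 : Int))])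
            acc2 (by omega) (Or.inl rfl) (by simp; omega)
          exact ⟨this.1, fun _ => this.2 (by simp; omega)⟩
      · rw [if_neg (by simpa using hh), if_neg (by simpa using hh)]
        have hr' : lpReady ls (i + 1) e := by
          cases hr with
          | inl h => exact Or.inl h
          | inr h =>
            refine Or.inr (fun j hj hjl hhj hnoh => h j (by omega) hjl hhj (fun k hk hkj => ?_))
            by_cases hki : k = i
            · subst hki
              rw [List.getD_eq_getElem _ _ hi]
              exact Bool.not_eq_true _ ▸ (by simpa using hh)
            · exact hnoh k (by omega) hkj
        exact ih (i + 1) e acc1 acc2 (by omega) hr' hle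
    · rw [List.drop_eq_nil_of_le (by omega)]
      simp [lpLoopA, lpLoopB]
      omega

theorem lp_len_strict (ls : List String) : ∀ (d i : Nat) (e : Option Nat)
    (acc1 acc2 : List (List String)), ls.length - i ≤ d → lpReady ls i e →
    acc2.length ≤ acc1.length →
    (∃ j, i ≤ j ∧ j < ls.length ∧
      PySem.Str.startswith (ls.getD j "") "Invoice ID" = true ∧
      lpFindTotal (ls.drop j) j = none) →
    (lpLoopB ls (lpNextTotals ls 0) (ls.drop i) i acc2).length <
      (lpLoopA ls (ls.drop i) i e acc1).length := by
  intro d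
  induction d with
  | zero =>
    intro i e acc1 acc2 hd hr hle hbad
    obtain ⟨j, hij, hjl, _⟩ := hbad; omega
  | succ d ih =>
    intro i e acc1 acc2 hd hr hle hbad
    obtain ⟨j, hij, hjl, hhj, hftj⟩ := hbad
    have hi : i < ls.length := by omega
    rw [List.drop_eq_getElem_cons hi]
    simp only [lpLoopA, lpLoopB]
    rw [← List.drop_eq_getElem_cons hi]
    have hnt : (lpNextTotals ls 0).getD i none = lpFindTotal (ls.drop i) i := by
      rw [lp_nt_lookup]; simp
    by_cases hh : PySem.Str.startswith ls[i] "Invoice ID" = true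
    · rw [hh, hnt]
      cases hft : lpFindTotal (ls.drop i) i with
      | some t =>
        have hji : j ≠ i := by rintro rfl; rw [hft] at hftj; simp at hftj
        exact ih (i + 1) (some (t + 1)) _ _ (by omega) (Or.inl rfl) (by simp; omega)
          ⟨j, by omega, hjl, hhj, hftj⟩
      | none =>
        have he : ∃ e0, e = some e0 := by
          cases hr with
          | inl h => exact Option.isSome_iff_exists.mp h
          | inr h =>
            exfalso
            have := h i le_rfl hi (by rwa [List.getD_eq_getElem _ _ hi]) (by omega)
            rw [hft] at this; simp at this
        obtain ⟨e0, rfl⟩ := he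
        exact (lp_len_mono ls (ls.length - (i + 1)) (i + 1) (some e0)
          (acc1 ++ [PySem.List.slice ls (some ((i : Int) - 8)) (some (e0 : Int))]) acc2
          le_rfl (Or.inl rfl) (by simp; omega)).2 (by simp; omega)
    · have hji : j ≠ i := by
        rintro rfl
        rw [List.getD_eq_getElem _ _ hi] at hhj; exact hh hhj
      rw [if_neg (by simpa using hh), if_neg (by simpa using hh)]
      have hr' : lpReady ls (i + 1) e := by
        cases hr with
        | inl h => exact Or.inl h
        | inr h =>
          refine Or.inr (fun j' hj' hjl' hhj' hnoh => h j' (by omega) hjl' hhj' (fun k hk hkj => ?_))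
          by_cases hki : k = i
          · subst hki
            rw [List.getD_eq_getElem _ _ hi]
            exact Bool.not_eq_true _ ▸ (by simpa using hh)
          · exact hnoh k (by omega) hkj
      exact ih (i + 1) e acc1 acc2 (by omega) hr' hle ⟨j, by omega, hjl, hhj, hftj⟩

theorem lp_ready_of_pre (ls : List String) (hpre : Pre_line_parser ls) : lpReady ls 0 none := by
  refine Or.inr (fun j _ hjl hhj hnoh => ?_)
  exact lp_ft_some ls j (by
    obtain ⟨t, htl, hjt, htot⟩ := hpre j hjl ⟨hhj, fun k hk => hnoh k (by omega) hk⟩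
    exact ⟨t, hjt, htl, htot⟩)

theorem lp_spec_aux (ls : List String) (hnd : ¬ D_line_parser ls) :
    line_parser ls = line_parser_alt ls := by
  unfold line_parser line_parser_alt
  have h0 : ls = ls.drop 0 := by simp
  rw [show (lpLoopA ls ls 0 none [] = lpLoopA ls (ls.drop 0) 0 none []) by rw [← h0],
      show (lpLoopB ls (lpNextTotals ls 0) ls 0 [] = lpLoopB ls (lpNextTotals ls 0) (ls.drop 0) 0 []) by rw [← h0]]
  exact lp_loops_eq_aux ls ls.length 0 none [] (by omega) (fun j hj => lp_H_of_not_D ls hnd j (by omega))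

theorem lp_tight_aux (ls : List String) (hpre : Pre_line_parser ls) (hd : D_line_parser ls) :
    line_parser ls ≠ line_parser_alt ls := by
  obtain ⟨i, hil, hhi, hnt⟩ := hd
  have hft : lpFindTotal (ls.drop i) i = none :=
    lp_ft_none ls i (fun t hit htl => hnt t htl hit)
  have hlt := lp_len_strict ls ls.length 0 none [] [] (by omega)
    (lp_ready_of_pre ls hpre) le_rfl ⟨i, by omega, hil, hhi, hft⟩
  intro heq
  unfold line_parser line_parser_alt at heq
  rw [show ls.drop 0 = ls by simp] at hlt
  rw [heq] at hlt
  exact lt_irrefl _ hlt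

-- ===== VERDICT (by name: the statement is the Claim_ definition above) =====
theorem line_parser_spec : Claim_unchanged_line_parser := by
  intro ls _ _ hnd
  exact lp_spec_aux ls hnd

theorem line_parser_changed : Claim_changed_line_parser := by
  unfold Claim_changed_line_parser; decide

theorem line_parser_tight : Claim_exact_line_parser := by
  intro ls _ hpre hd
  exact lp_tight_aux ls hpre hd
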